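-- pv_equiv track=rewrite | github.com/mycomgroup/akshare-data-service | src/akshare_data/offline/generator/param_transform_rules.py | _category_matches
-- ===== SOURCE A (Python) =====
-- from typing import Dict, List, Optional, Tuple
--
-- CATEGORY_HIERARCHY: Dict[str, List[str]] = {
--     "equity": ["stock", "fund", "index", "etf", "lof"],
--     "fund": ["fund", "etf", "lof"],
--     "index": ["index"],
--     "futures": ["futures"],
--     "options": ["options"],
--     "macro": ["macro"],
--     "bond": ["bond"],
--     "market": ["stock", "fund", "index", "etf", "lof", "futures", "options", "bond"],
--     "other": ["*"],
-- }
--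
-- def _category_matches(check_category: Optional[str], allowed_categories: List[str]) -> bool:
--     """检查 check_category 是否与 allowed_categories 中的任一类别匹配"""
--     if check_category is None:
--         return True
--     if "*" in allowed_categories:
--         return True
--     if not check_category:
--         return True
--
--     check_category = check_category.lower()
--     for allowed in allowed_categories:
--         allowed_lower = allowed.lower()
--         if allowed_lower == check_category:
--             return True
--         if check_category in CATEGORY_HIERARCHY:
--             siblings = CATEGORY_HIERARCHY[check_category]
--             if allowed_lower in siblings:
--                 return True
--         if allowed_lower in CATEGORY_HIERARCHY:
--             siblings = CATEGORY_HIERARCHY[allowed_lower]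
--             if check_category in siblings:
--                 return True
--     return False
-- ===== SOURCE B (Python) =====
-- from typing import Dict, List, Optional
--
-- CATEGORY_HIERARCHY: Dict[str, List[str]] = {
--     "equity": ["stock", "fund", "index", "etf", "lof"],
--     "fund": ["fund", "etf", "lof"],
--     "index": ["index"],
--     "futures": ["futures"],
--     "options": ["options"],
--     "macro": ["macro"],
--     "bond": ["bond"],
--     "market": ["stock", "fund", "index", "etf", "lof", "futures", "options", "bond"],
--     "other": ["*"],
-- }
--
-- def _category_matches(check_category: Optional[str], allowed_categories: List[str]) -> bool:
--     if check_category is None: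
--         return True
--     if "*" in allowed_categories:
--         return True
--     if not check_category:
--         return True
--
--     check = check_category.lower()
--     # Build the set of all (lowercased) categories that match `check` once,
--     # then do a single membership pass over allowed_categories.
--     matching = {check}
--     matching.update(CATEGORY_HIERARCHY.get(check, []))
--     matching.update(parent for parent, sibs in CATEGORY_HIERARCHY.items() if check in sibs)
--     return any(a.lower() in matching for a in allowed_categories)
-- ===== Notes on version B (the rewrite author's own statement) =====
-- stated objective: alternative
-- what changed: B precomputes the set of matching categories (the category itself, its children from CATEGORY_HIERARCHY, and every parent whose children contain it) once, then does a single membership-test pass over allowed_categories, instead of A's per-element re-scan of the hierarchy.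
import Mathlib
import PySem

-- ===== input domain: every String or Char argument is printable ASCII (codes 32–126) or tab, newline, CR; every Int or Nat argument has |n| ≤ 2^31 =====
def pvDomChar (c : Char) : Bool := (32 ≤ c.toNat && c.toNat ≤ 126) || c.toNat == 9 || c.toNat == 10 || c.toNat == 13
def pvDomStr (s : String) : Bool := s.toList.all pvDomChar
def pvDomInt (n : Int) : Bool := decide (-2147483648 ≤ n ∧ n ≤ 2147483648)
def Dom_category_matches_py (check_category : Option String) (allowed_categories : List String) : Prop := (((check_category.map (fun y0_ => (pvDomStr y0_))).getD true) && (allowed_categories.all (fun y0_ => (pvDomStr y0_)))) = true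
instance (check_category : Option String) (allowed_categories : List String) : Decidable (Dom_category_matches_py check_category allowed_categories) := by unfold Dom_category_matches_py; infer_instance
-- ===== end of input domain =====

-- B builds the set of matching categories once and does one membership pass
-- over allowed_categories, instead of A's per-element re-scan of the hierarchy.

-- shared module constant CATEGORY_HIERARCHY (a dict literal with distinct keys)
def pvHier : PySem.Dict String (List String) := PySem.Dict.ofList [
  ("equity", ["stock", "fund", "index", "etf", "lof"]),
  ("fund", ["fund", "etf", "lof"]),
  ("index", ["index"]),
  ("futures", ["futures"]),
  ("options", ["options"]),
  ("macro", ["macro"]),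
  ("bond", ["bond"]),
  ("market", ["stock", "fund", "index", "etf", "lof", "futures", "options", "bond"]),
  ("other", ["*"])]

-- ===== PORT A =====
-- the for-loop of A: early return true on any of the three conditions, else continue
def pvLoopA (check : String) : List String → Bool
  | [] => false
  | a :: rest =>
    let al := PySem.Str.lower a
    if al == check then true
    else if (match pvHier.get? check with
             | some siblings => siblings.contains al
             | none => false) then true
    else if (match pvHier.get? al with
             | some siblings => siblings.contains check
             | none => false) then true
    else pvLoopA check rest

def category_matches_py (check_category : Option String) (allowed_categories : List String) : Bool :=
  match check_category with
  | none => true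
  | some cc =>
    if allowed_categories.contains "*" then true
    else if cc == "" then true
    else pvLoopA (PySem.Str.lower cc) allowed_categories

-- ===== PORT B =====
-- the set `matching` of Source B: {check} ∪ CATEGORY_HIERARCHY.get(check, []) ∪ {parent | check ∈ sibs}
def pvMatching (check : String) : PySem.Set String :=
  PySem.Set.ofList (check :: pvHier.getD check [] ++
    (pvHier.items.filter (fun p => p.2.contains check)).map Prod.fst)

def category_matches_py_alt (check_category : Option String) (allowed_categories : List String) : Bool :=
  match check_category with
  | none => true
  | some cc =>
    if allowed_categories.contains "*" then true
    else if cc == "" then true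
    else
      let matching := pvMatching (PySem.Str.lower cc)
      allowed_categories.any (fun a => matching.contains (PySem.Str.lower a))

-- ===== PRECONDITION & SPEC =====
def Spec_category_matches_py (check_category : Option String) (allowed_categories : List String) (out : Bool) : Prop := out = category_matches_py_alt check_category allowed_categories
instance (check_category : Option String) (allowed_categories : List String) (out : Bool) : Decidable (Spec_category_matches_py check_category allowed_categories out) := by unfold Spec_category_matches_py; infer_instance

-- ===== CLAIM (what is proved, stated in full; the proofs are below) =====
def Claim_equal_category_matches_py : Prop := ∀ (check_category : Option String) (allowed_categories : List String), Dom_category_matches_py check_category allowed_categories → Spec_category_matches_py check_category allowed_categories (category_matches_py check_category allowed_categories)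

-- ===== LEMMAS AND PROOFS =====

-- reverse lookup over an association list with distinct keys:
-- "check ∈ value at key al" = "al is among the keys whose value contains check"
theorem pvParents_eq (l : List (String × List String))
    (hn : (l.map Prod.fst).Nodup) (al check : String) :
    (match (PySem.Dict.mk l).get? al with
     | some siblings => siblings.contains check
     | none => false) =
    ((l.filter (fun p => p.2.contains check)).map Prod.fst).contains al := by
  induction l with
  | nil => simp [PySem.Dict.get?]
  | cons p rest ih =>
    obtain ⟨k, v⟩ := p
    simp only [List.map_cons, List.nodup_cons] at hn
    rw [PySem.Dict.get?_mk_cons]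
    by_cases hv : check ∈ v <;> by_cases hk : k = al
    · subst hk
      simp [hv, List.contains_eq_mem]
    · have hb : (k == al) = false := by simp [hk]
      rw [hb]
      simp only [Bool.false_eq_true, if_false]
      rw [ih hn.2]
      simp only [List.contains_eq_mem, List.filter_cons]
      simp [hv, Ne.symm hk]
    · subst hk
      simp only [List.contains_eq_mem, List.filter_cons]
      simp [hv]
      intro x hx hcx
      exact hn.1 (List.mem_map.mpr ⟨(k, x), hx, rfl⟩)
    · have hb : (k == al) = false := by simp [hk]
      rw [hb]
      simp only [Bool.false_eq_true, if_false]
      rw [ih hn.2]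
      simp only [List.contains_eq_mem, List.filter_cons]
      simp [hv]

theorem pvHier_items : pvHier.items = [
  ("equity", ["stock", "fund", "index", "etf", "lof"]),
  ("fund", ["fund", "etf", "lof"]),
  ("index", ["index"]),
  ("futures", ["futures"]),
  ("options", ["options"]),
  ("macro", ["macro"]),
  ("bond", ["bond"]),
  ("market", ["stock", "fund", "index", "etf", "lof", "futures", "options", "bond"]),
  ("other", ["*"])] := by decide

theorem pvHier_mk : pvHier = PySem.Dict.mk pvHier.items := by
  rw [pvHier_items]; decide

-- per-element: A's three tests equal membership in B's precomputed set
theorem pvElem_eq (check al : String) :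
    ((al == check) ||
      (match pvHier.get? check with
       | some siblings => siblings.contains al
       | none => false) ||
      (match pvHier.get? al with
       | some siblings => siblings.contains check
       | none => false)) =
    (pvMatching check).contains al := by
  have hpar := pvParents_eq pvHier.items (by rw [pvHier_items]; decide) al check
  rw [← pvHier_mk] at hpar
  rw [hpar]
  unfold pvMatching
  have hm : (PySem.Set.ofList (check :: pvHier.getD check [] ++
      (pvHier.items.filter (fun p => p.2.contains check)).map Prod.fst)).contains al =
      decide (al ∈ (check :: pvHier.getD check [] ++
      (pvHier.items.filter (fun p => p.2.contains check)).map Prod.fst)) := by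
    simp [List.contains_eq_mem, PySem.Set.mem_ofList]
  rw [hm]
  have hmid : (match pvHier.get? check with
       | some siblings => siblings.contains al
       | none => false) = (pvHier.getD check []).contains al := by
    cases h : pvHier.get? check <;> simp [PySem.Dict.getD, h]
  rw [hmid]
  simp only [List.contains_eq_mem, List.mem_cons, List.mem_append]
  simp only [eq_comm]
  have hbc : (al == check) = decide (check = al) := by
    by_cases h : check = al
    · simp [h]
    · simp [h, Ne.symm h]
  rw [hbc]
  simp [eq_comm]

-- the loop of A is the single any-pass of B
theorem pvLoop_eq (check : String) (l : List String) :
    pvLoopA check l = l.any (fun a => (pvMatching check).contains (PySem.Str.lower a)) := by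
  induction l with
  | nil => simp [pvLoopA]
  | cons a rest ih =>
    rw [List.any_cons, ← ih, ← pvElem_eq check (PySem.Str.lower a)]
    simp only [pvLoopA]
    cases h1 : (PySem.Str.lower a == check) <;>
      cases h2 : (match pvHier.get? check with
        | some siblings => siblings.contains (PySem.Str.lower a)
        | none => false) <;>
      cases h3 : (match pvHier.get? (PySem.Str.lower a) with
        | some siblings => siblings.contains check
        | none => false) <;>
      simp

-- ===== VERDICT (by name: the statement is the Claim_ definition above) =====
theorem category_matches_py_spec : Claim_equal_category_matches_py := by
  intro cc allowed _
  unfold Spec_category_matches_py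
  cases cc with
  | none => rfl
  | some c =>
    simp only [category_matches_py, category_matches_py_alt]
    by_cases h1 : allowed.contains "*" = true
    · rw [if_pos h1, if_pos h1]
    · rw [if_neg h1, if_neg h1]
      by_cases h2 : (c == "") = true
      · rw [if_pos h2, if_pos h2]
      · rw [if_neg h2, if_neg h2]
        exact pvLoop_eq _ _
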